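-- pv_equiv track=rewrite | github.com/machinat4r/afip-algo | 2.2.py | recup_ekip
-- ===== SOURCE A (Python) =====
-- def recup_ekip(ligne):
--
--
--     sepa = ","
--     acc = 0
--     sequence = []
--
--
--     for pos_actu in ligne:
--         if pos_actu == sepa:
--             acc = acc + 1
--         if acc > 0 and acc <= 1 and pos_actu != sepa:
--             sequence += pos_actu
--     return sequence[0] + sequence[1] + sequence[2]
-- ===== SOURCE B (Python) =====
-- def recup_ekip(ligne):
--     champ = ligne.split(",")[1]
--     return champ[0] + champ[1] + champ[2]
-- ===== Notes on version B (the rewrite author's own statement) =====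
-- stated objective: simpler
-- what changed: Replaces the character-by-character comma-counting state machine with split(',') and direct indexing of the second field.
import Mathlib
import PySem

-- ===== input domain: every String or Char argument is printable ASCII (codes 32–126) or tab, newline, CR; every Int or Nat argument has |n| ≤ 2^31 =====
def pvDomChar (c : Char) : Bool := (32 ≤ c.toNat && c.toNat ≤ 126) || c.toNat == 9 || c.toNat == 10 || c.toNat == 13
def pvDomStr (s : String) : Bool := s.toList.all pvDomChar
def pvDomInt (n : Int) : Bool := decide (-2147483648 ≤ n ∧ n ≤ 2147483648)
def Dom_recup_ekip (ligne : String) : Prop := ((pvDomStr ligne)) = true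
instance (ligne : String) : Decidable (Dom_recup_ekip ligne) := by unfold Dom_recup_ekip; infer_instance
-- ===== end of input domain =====

-- B replaces A's character-by-character comma-counting state machine with split(",") and
-- direct indexing of the second field (objective: simpler).


-- ===== PORT A =====
-- the loop's state: (acc, sequence); each character updates acc then maybe appends
def recup_ekip (ligne : String) : String :=
  let sepa : Char := ','
  let st := ligne.toList.foldl
    (fun (s : Int × List Char) (pos_actu : Char) =>
      let acc := if pos_actu = sepa then s.1 + 1 else s.1
      let sequence := if acc > 0 ∧ acc ≤ 1 ∧ pos_actu ≠ sepa then s.2 ++ [pos_actu] else s.2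
      (acc, sequence))
    (0, [])
  -- sequence[0] + sequence[1] + sequence[2]; Python raises IndexError when any is missing
  -- (those inputs are excluded by Pre_recup_ekip)
  match PySem.List.pyGet? st.2 0, PySem.List.pyGet? st.2 1, PySem.List.pyGet? st.2 2 with
  | some a, some b, some c => String.ofList [a, b, c]
  | _, _, _ => ""

-- ===== PORT B =====
-- champ = ligne.split(",")[1]; Chars.splitOn is PySem's str.split for a nonempty separator
def recup_ekip_alt (ligne : String) : String :=
  match PySem.List.pyGet? (PySem.Chars.splitOn ligne.toList [',']) 1 with
  | none => ""   -- Python: IndexError (excluded by Pre_recup_ekip)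
  | some champ =>
    -- champ[0] + champ[1] + champ[2]; IndexError when champ is shorter than 3 (excluded)
    match PySem.List.pyGet? champ 0 with
    | none => ""
    | some a =>
      match PySem.List.pyGet? champ 1 with
      | none => ""
      | some b =>
        match PySem.List.pyGet? champ 2 with
        | none => ""
        | some c => String.ofList [a, b, c]

-- ===== PRECONDITION & SPEC =====
-- Pre_ excludes exactly the inputs where Python A raises IndexError: lines with no comma,
-- and lines whose second comma-delimited field has fewer than 3 characters.
def Pre_recup_ekip (ligne : String) : Prop :=
  (',' ∈ ligne.toList) ∧
  3 ≤ (((ligne.toList.dropWhile (· ≠ ',')).tail).takeWhile (· ≠ ',')).length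
instance (ligne : String) : Decidable (Pre_recup_ekip ligne) := by unfold Pre_recup_ekip; infer_instance
def pvWitness_recup_ekip : String := "ab,cde,f"

def Spec_recup_ekip (ligne : String) (out : String) : Prop := out = recup_ekip_alt ligne
instance (ligne : String) (out : String) : Decidable (Spec_recup_ekip ligne out) := by unfold Spec_recup_ekip; infer_instance

-- ===== CLAIM (what is proved, stated in full; the proofs are below) =====
def Claim_equal_recup_ekip : Prop := ∀ (ligne : String), Dom_recup_ekip ligne → Pre_recup_ekip ligne → Spec_recup_ekip ligne (recup_ekip ligne)

-- ===== LEMMAS AND PROOFS =====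

-- the second comma-delimited field, as a list of characters
def pvMid (l : List Char) : List Char :=
  ((l.dropWhile (· ≠ ',')).tail).takeWhile (· ≠ ',')

-- the body of A's loop
def pvStep (s : Int × List Char) (c : Char) : Int × List Char :=
  let acc := if c = ',' then s.1 + 1 else s.1
  let sequence := if acc > 0 ∧ acc ≤ 1 ∧ c ≠ ',' then s.2 ++ [c] else s.2
  (acc, sequence)

lemma pvStep_comma (a : Int) (s : List Char) : pvStep (a, s) ',' = (a + 1, s) := by
  simp [pvStep]

lemma pvStep_other (a : Int) (s : List Char) {c : Char} (hc : c ≠ ',') :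
    pvStep (a, s) c = (a, if a > 0 ∧ a ≤ 1 then s ++ [c] else s) := by
  simp [pvStep, hc]

-- once acc ≥ 2, nothing is ever appended
lemma pvFold_ge_two (l : List Char) : ∀ (a : Int) (s : List Char), 2 ≤ a →
    (l.foldl pvStep (a, s)).2 = s := by
  induction l with
  | nil => intro a s _; rfl
  | cons c rest ih =>
    intro a s ha
    rw [List.foldl_cons]
    by_cases hc : c = ','
    · subst hc; rw [pvStep_comma]; exact ih (a + 1) s (by omega)
    · rw [pvStep_other a s hc, if_neg (by omega)]; exact ih a s ha

-- in state acc = 1 the loop appends exactly the chars up to the next comma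
lemma pvFold_one (l : List Char) : ∀ (s : List Char),
    (l.foldl pvStep (1, s)).2 = s ++ l.takeWhile (· ≠ ',') := by
  induction l with
  | nil => intro s; simp
  | cons c rest ih =>
    intro s
    rw [List.foldl_cons]
    by_cases hc : c = ','
    · subst hc; rw [pvStep_comma, pvFold_ge_two rest (1 + 1) s (by omega)]
      simp [List.takeWhile]
    · rw [pvStep_other 1 s hc, if_pos (by omega), ih]
      simp [List.takeWhile, hc]

-- in state acc = 0 the loop collects exactly the second field (nothing if no comma)
lemma pvFold_zero (l : List Char) : ∀ (s : List Char),
    (l.foldl pvStep (0, s)).2 = s ++ (if ',' ∈ l then pvMid l else []) := by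
  induction l with
  | nil => intro s; simp
  | cons c rest ih =>
    intro s
    rw [List.foldl_cons]
    by_cases hc : c = ','
    · subst hc
      rw [pvStep_comma, show (0 : Int) + 1 = 1 from rfl, pvFold_one rest s]
      simp [pvMid, List.dropWhile]
    · rw [pvStep_other 0 s hc, if_neg (by omega), ih]
      have hmid : pvMid (c :: rest) = pvMid rest := by
        simp [pvMid, List.dropWhile, hc]
      have hm : (',' ∈ c :: rest) ↔ (',' ∈ rest) := by
        simp [List.mem_cons, Ne.symm hc]
      rw [hmid]
      by_cases h : ',' ∈ rest <;> simp [h, hm]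

-- A's loop, with its inline lambda (zeta-reduced), computes the second field
lemma pvFoldA (l : List Char) :
    (List.foldl
      (fun (s : Int × List Char) (pos_actu : Char) =>
        (if pos_actu = ',' then s.1 + 1 else s.1,
         if (if pos_actu = ',' then s.1 + 1 else s.1) > 0 ∧
              (if pos_actu = ',' then s.1 + 1 else s.1) ≤ 1 ∧ pos_actu ≠ ',' then
           s.2 ++ [pos_actu]
         else s.2)) ((0 : Int), ([] : List Char)) l).2
      = if ',' ∈ l then pvMid l else [] := by
  have h : (fun (s : Int × List Char) (pos_actu : Char) =>
      (if pos_actu = ',' then s.1 + 1 else s.1,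
       if (if pos_actu = ',' then s.1 + 1 else s.1) > 0 ∧
            (if pos_actu = ',' then s.1 + 1 else s.1) ≤ 1 ∧ pos_actu ≠ ',' then
         s.2 ++ [pos_actu]
       else s.2)) = pvStep := rfl
  rw [h, pvFold_zero l []]
  simp

-- recursive description of splitOn's worker for the single-character separator ','
def pvParts (pre : List Char) : List Char → List (List Char)
  | [] => [pre]
  | c :: rest => if c = ',' then pre :: pvParts [] rest else pvParts (pre ++ [c]) rest

lemma pvGo_parts : ∀ (l : List Char) (fuel : Nat) (cur : List Char) (acc : List (List Char)),
    l.length ≤ fuel →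
    PySem.Chars.splitOn.go [','] fuel l cur acc = acc.reverse ++ pvParts cur.reverse l := by
  intro l
  induction l with
  | nil =>
    intro fuel cur acc _
    cases fuel <;> simp [PySem.Chars.splitOn.go, pvParts]
  | cons c rest ih =>
    intro fuel cur acc h
    cases fuel with
    | zero => simp at h
    | succ f =>
      rw [PySem.Chars.splitOn.go]
      by_cases hc : c = ','
      · have hp : List.isPrefixOf [','] (c :: rest) = true := by simp [List.isPrefixOf, hc]
        rw [if_pos hp]
        have hd : List.drop (List.length [',']) (c :: rest) = rest := by simp
        rw [hd, ih f [] (cur.reverse :: acc) (by simpa using Nat.le_of_succ_le_succ h)]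
        simp [pvParts, hc]
      · have hp : ¬ List.isPrefixOf [','] (c :: rest) = true := by
          simp [List.isPrefixOf]; intro h'; exact hc h'.symm
        rw [if_neg hp, ih f (c :: cur) acc (by simpa using Nat.le_of_succ_le_succ h)]
        simp [pvParts, hc]

lemma pvSplitOn_eq_parts (l : List Char) :
    PySem.Chars.splitOn l [','] = pvParts [] l := by
  rw [PySem.Chars.splitOn, pvGo_parts l (l.length + 1) [] [] (by omega)]
  simp

lemma pvParts_head : ∀ (l : List Char) (pre : List Char),
    (pvParts pre l).head? = some (pre ++ l.takeWhile (· ≠ ',')) := by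
  intro l
  induction l with
  | nil => intro pre; simp [pvParts]
  | cons c rest ih =>
    intro pre
    by_cases hc : c = ','
    · simp [pvParts, hc, List.takeWhile]
    · simp [pvParts, hc, List.takeWhile, ih]

lemma pvParts_get1 : ∀ (l : List Char) (pre : List Char),
    (pvParts pre l)[1]? = if ',' ∈ l then some (pvMid l) else none := by
  intro l
  induction l with
  | nil => intro pre; simp [pvParts]
  | cons c rest ih =>
    intro pre
    by_cases hc : c = ','
    · have h1 : (pvParts pre (c :: rest))[1]? = (pvParts [] rest).head? := by
        simp [pvParts, hc, List.head?_eq_getElem?]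
      rw [h1, pvParts_head]
      simp [hc, pvMid, List.dropWhile]
    · have hmid : pvMid (c :: rest) = pvMid rest := by
        simp [pvMid, List.dropWhile, hc]
      have hm : (',' ∈ c :: rest) ↔ (',' ∈ rest) := by
        simp [List.mem_cons, Ne.symm hc]
      simp only [pvParts, if_neg hc]
      rw [ih, hmid]
      by_cases h : ',' ∈ rest <;> simp [h, hm]

-- ===== VERDICT (by name: the statement is the Claim_ definition above) =====
theorem recup_ekip_spec : Claim_equal_recup_ekip := by
  intro ligne _ hpre
  obtain ⟨hmem, hlen⟩ := hpre
  simp only [Spec_recup_ekip, recup_ekip, recup_ekip_alt]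
  rw [pvFoldA ligne.toList, if_pos hmem]
  have hB : PySem.List.pyGet? (PySem.Chars.splitOn ligne.toList [',']) 1
      = some (pvMid ligne.toList) := by
    rw [show (1 : Int) = ((1 : Nat) : Int) from rfl, PySem.List.pyGet?_natCast,
      pvSplitOn_eq_parts, pvParts_get1, if_pos hmem]
  rw [hB]
  have hlen' : 3 ≤ (pvMid ligne.toList).length := hlen
  obtain ⟨a, b, c, r, hr⟩ : ∃ a b c r, pvMid ligne.toList = a :: b :: c :: r := by
    match hm : pvMid ligne.toList with
    | [] | [_] | [_, _] => rw [hm] at hlen'; simp at hlen'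
    | a :: b :: c :: r => exact ⟨a, b, c, r, rfl⟩
  rw [hr]
  have g0 : PySem.List.pyGet? (a :: b :: c :: r) 0 = some a := by
    rw [show (0 : Int) = ((0 : Nat) : Int) from rfl, PySem.List.pyGet?_natCast]; rfl
  have g1 : PySem.List.pyGet? (a :: b :: c :: r) 1 = some b := by
    rw [show (1 : Int) = ((1 : Nat) : Int) from rfl, PySem.List.pyGet?_natCast]; rfl
  have g2 : PySem.List.pyGet? (a :: b :: c :: r) 2 = some c := by
    rw [show (2 : Int) = ((2 : Nat) : Int) from rfl, PySem.List.pyGet?_natCast]; rfl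
  simp only [g0, g1, g2]
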